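-- pv_equiv track=rewrite | github.com/seanbetts/sidebar | backend/skills/web-crawler-policy/scripts/analyze_policies.py | prioritize_domains
-- ===== SOURCE A (Python) =====
-- from typing import Dict, List, Set, Optional, Any
--
-- def prioritize_domains(domains: Set[str], main_domain: str) -> List[str]:
--     """Sort domains with main domain first, then important subdomains."""
--     domain_list = list(domains)
--     prioritized = []
--
--     # 1. Main domain first
--     if main_domain in domain_list:
--         prioritized.append(main_domain)
--         domain_list.remove(main_domain)
--
--     # 2. www version of main domain second
--     www_main = f"www.{main_domain}"
--     if www_main in domain_list:
--         prioritized.append(www_main)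
--         domain_list.remove(www_main)
--
--     # 3. Important public-facing subdomains
--     important_patterns = ['docs.', 'api.', 'shop.', 'store.', 'support.', 'blog.', 'console.', 'status.', 'help.']
--     important_domains = []
--     remaining_domains = []
--
--     for domain in domain_list:
--         if any(domain.startswith(pattern) for pattern in important_patterns):
--             important_domains.append(domain)
--         else:
--             remaining_domains.append(domain)
--
--     # Sort each group alphabetically
--     important_domains.sort()
--     remaining_domains.sort()
--
--     return prioritized + important_domains + remaining_domains
-- ===== SOURCE B (Python) =====
-- IMPORTANT_PATTERNS = ('docs.', 'api.', 'shop.', 'store.', 'support.', 'blog.', 'console.', 'status.', 'help.')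
--
-- def _priority(d, main_domain):
--     """(class, name) sort key: main < www.main < important subdomain < rest."""
--     if d == main_domain:
--         return (0, '')
--     if d == 'www.' + main_domain:
--         return (1, '')
--     if d.startswith(IMPORTANT_PATTERNS):
--         return (2, d)
--     return (3, d)
--
-- def prioritize_domains(domains, main_domain):
--     """Sort domains with main domain first, then important subdomains."""
--     return sorted(domains, key=lambda d: _priority(d, main_domain))
-- ===== Notes on version B (the rewrite author's own statement) =====
-- stated objective: idiomatic
-- what changed: Replaces the remove/partition/two-sorts-and-concatenate pipeline by a single stable sort of the input under a priority key (class, name) with class 0 = main domain, 1 = www.main, 2 = important subdomain, 3 = rest.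
import Mathlib
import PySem

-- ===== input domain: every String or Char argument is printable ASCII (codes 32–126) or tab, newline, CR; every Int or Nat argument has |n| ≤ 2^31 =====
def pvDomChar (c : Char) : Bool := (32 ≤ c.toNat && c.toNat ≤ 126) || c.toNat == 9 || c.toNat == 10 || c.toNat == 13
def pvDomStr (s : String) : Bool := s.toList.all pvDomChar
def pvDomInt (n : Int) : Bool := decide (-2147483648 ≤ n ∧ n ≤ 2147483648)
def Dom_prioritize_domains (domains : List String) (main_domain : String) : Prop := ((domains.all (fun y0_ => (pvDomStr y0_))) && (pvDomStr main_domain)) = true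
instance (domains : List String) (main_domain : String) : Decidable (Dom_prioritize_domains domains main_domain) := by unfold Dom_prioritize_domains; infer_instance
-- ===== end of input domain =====

-- B replaces A's remove/partition/two-sorts-and-concatenate pipeline by one stable sort of the
-- input under a priority key (class, name); same cost, more idiomatic. Proved equal on duplicate-free
-- inputs (A's declared parameter type is Set[str]).

-- the important_patterns list (module constant in Source B, local literal in Source A)
def pvPatterns : List String := ["docs.", "api.", "shop.", "store.", "support.", "blog.", "console.", "status.", "help."]

-- any(domain.startswith(pattern) for pattern in important_patterns)
def pvIsImportant (d : String) : Bool := pvPatterns.any (fun pattern => PySem.Str.startswith d pattern)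

-- ===== PORT A =====
def prioritize_domains (domains : List String) (main_domain : String) : List String :=
  let domain_list := domains
  let prioritized : List String := []
  -- 1. main domain first ('in' guard makes remove? return some; getD never takes its default)
  let (prioritized, domain_list) :=
    if main_domain ∈ domain_list then
      (prioritized ++ [main_domain], (PySem.List.remove? domain_list main_domain).getD domain_list)
    else (prioritized, domain_list)
  -- 2. www version of main domain second
  let www_main : String := "www." ++ main_domain
  let (prioritized, domain_list) :=
    if www_main ∈ domain_list then
      (prioritized ++ [www_main], (PySem.List.remove? domain_list www_main).getD domain_list)
    else (prioritized, domain_list)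
  -- 3. partition loop over domain_list
  let groups := domain_list.foldl
    (fun (acc : List String × List String) domain =>
      if pvIsImportant domain then (acc.1 ++ [domain], acc.2)
      else (acc.1, acc.2 ++ [domain]))
    ([], [])
  -- sort each group alphabetically (.sort() = stable sort, no key)
  let important_domains := PySem.List.sorted groups.1 (fun x => x) false
  let remaining_domains := PySem.List.sorted groups.2 (fun x => x) false
  prioritized ++ important_domains ++ remaining_domains

-- ===== PORT B =====
-- _priority(d, main_domain): Python tuple keys compare lexicographically → Nat ×ₗ String
def pdPriority (main_domain d : String) : Nat ×ₗ String :=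
  if d == main_domain then toLex (0, "")
  else if d == "www." ++ main_domain then toLex (1, "")
  else if pvIsImportant d then toLex (2, d)
  else toLex (3, d)

def prioritize_domains_alt (domains : List String) (main_domain : String) : List String :=
  PySem.List.sorted domains (fun d => pdPriority main_domain d) false

-- ===== PRECONDITION & SPEC =====
-- Pre_ requires distinct domains: A's declared parameter type is Set[str] (elements are distinct);
-- on lists with duplicates the placement of the surviving copies of main/www is an artefact of
-- list.remove removing only the first occurrence.
def Pre_prioritize_domains (domains : List String) (main_domain : String) : Prop := domains.Nodup
instance (domains : List String) (main_domain : String) : Decidable (Pre_prioritize_domains domains main_domain) := by unfold Pre_prioritize_domains; infer_instance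
def pvWitness_prioritize_domains : List String × String := (["zeta.ex.com", "api.ex.com", "ex.com", "www.ex.com"], "ex.com")

def Spec_prioritize_domains (domains : List String) (main_domain : String) (out : List String) : Prop := out = prioritize_domains_alt domains main_domain
instance (domains : List String) (main_domain : String) (out : List String) : Decidable (Spec_prioritize_domains domains main_domain out) := by unfold Spec_prioritize_domains; infer_instance

-- ===== CLAIM (what is proved, stated in full; the proofs are below) =====
def Claim_equal_prioritize_domains : Prop := ∀ (domains : List String) (main_domain : String), Dom_prioritize_domains domains main_domain → Pre_prioritize_domains domains main_domain → Spec_prioritize_domains domains main_domain (prioritize_domains domains main_domain)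

-- ===== LEMMAS AND PROOFS =====

-- the list after step 1 (main removed if present) and after step 2 (www removed if present)
def pvL1 (domains : List String) (md : String) : List String :=
  if md ∈ domains then domains.erase md else domains
def pvL2 (domains : List String) (md : String) : List String :=
  if ("www." ++ md) ∈ pvL1 domains md then (pvL1 domains md).erase ("www." ++ md) else pvL1 domains md
def pvPrio (domains : List String) (md : String) : List String :=
  (if md ∈ domains then [md] else []) ++ (if ("www." ++ md) ∈ pvL1 domains md then ["www." ++ md] else [])

lemma pv_www_ne (md : String) : "www." ++ md ≠ md := by
  intro h; have := congrArg String.length h; simp [String.length_append] at this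

lemma pv_foldl_partition (p : String → Bool) (xs : List String) (i r : List String) :
    xs.foldl (fun (acc : List String × List String) d =>
        if p d then (acc.1 ++ [d], acc.2) else (acc.1, acc.2 ++ [d])) (i, r)
      = (i ++ xs.filter p, r ++ xs.filter (fun d => !p d)) := by
  induction xs generalizing i r with
  | nil => simp
  | cons x xs ih =>
    by_cases h : p x
    · simp [h, ih]
    · simp [h, ih]

lemma pv_A_char (domains : List String) (md : String) :
    prioritize_domains domains md =
      pvPrio domains md
        ++ PySem.List.sorted ((pvL2 domains md).filter pvIsImportant) (fun x => x) false
        ++ PySem.List.sorted ((pvL2 domains md).filter (fun d => !pvIsImportant d)) (fun x => x) false := by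
  unfold prioritize_domains pvPrio pvL2 pvL1
  by_cases hm : md ∈ domains
  · simp only [hm, if_true, PySem.List.remove?_eq_some_erase domains md hm, Option.getD_some]
    by_cases hw : ("www." ++ md) ∈ domains.erase md
    · simp only [hw, if_true, PySem.List.remove?_eq_some_erase (domains.erase md) ("www." ++ md) hw,
        Option.getD_some, pv_foldl_partition]
      simp
    · simp only [hw, if_false, pv_foldl_partition]
      simp
  · simp only [hm, if_false]
    by_cases hw : ("www." ++ md) ∈ domains
    · simp only [hw, if_true, PySem.List.remove?_eq_some_erase domains ("www." ++ md) hw,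
        Option.getD_some, pv_foldl_partition]
      simp
    · simp only [hw, if_false, pv_foldl_partition]
      simp

lemma pv_L2_perm (domains : List String) (md : String) :
    List.Perm (pvPrio domains md ++ pvL2 domains md) domains := by
  unfold pvPrio pvL2 pvL1
  by_cases hm : md ∈ domains
  · simp only [hm, if_true]
    by_cases hw : ("www." ++ md) ∈ domains.erase md
    · simp only [hw, if_true]
      exact (((List.perm_cons_erase hw).symm.cons md).trans (List.perm_cons_erase hm).symm)
    · simp only [hw, if_false]
      exact ((List.perm_cons_erase hm).symm)
  · simp only [hm, if_false]
    by_cases hw : ("www." ++ md) ∈ domains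
    · simp only [hw, if_true]
      exact ((List.perm_cons_erase hw).symm)
    · simp only [hw, if_false]
      simp

lemma pv_perm (domains : List String) (md : String) :
    List.Perm
      (pvPrio domains md
        ++ PySem.List.sorted ((pvL2 domains md).filter pvIsImportant) (fun x => x) false
        ++ PySem.List.sorted ((pvL2 domains md).filter (fun d => !pvIsImportant d)) (fun x => x) false)
      domains := by
  rw [List.append_assoc]
  have h1 : List.Perm
      (PySem.List.sorted ((pvL2 domains md).filter pvIsImportant) (fun x => x) false
        ++ PySem.List.sorted ((pvL2 domains md).filter (fun d => !pvIsImportant d)) (fun x => x) false)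
      (pvL2 domains md) :=
    ((PySem.List.sorted_perm _ _ _).append (PySem.List.sorted_perm _ _ _)).trans
      (List.filter_append_perm _ _)
  exact (((List.Perm.refl (pvPrio domains md)).append h1).trans (pv_L2_perm domains md))

lemma pv_lex_fst {a b : Nat × String} (h : a.1 < b.1) : toLex a < toLex b :=
  Prod.Lex.toLex_lt_toLex.mpr (Or.inl h)

lemma pv_lex_snd {a b : Nat × String} (h1 : a.1 = b.1) (h2 : a.2 < b.2) : toLex a < toLex b :=
  Prod.Lex.toLex_lt_toLex.mpr (Or.inr ⟨h1, h2⟩)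

lemma pv_lex_fst' {a b : Nat ×ₗ String} (h : (ofLex a).1 < (ofLex b).1) : a < b := by
  simpa using pv_lex_fst (a := ofLex a) (b := ofLex b) h

lemma pv_key_md (md : String) : pdPriority md md = toLex (0, "") := by
  simp [pdPriority]

lemma pv_key_www (md : String) : pdPriority md ("www." ++ md) = toLex (1, "") := by
  simp [pdPriority, pv_www_ne md]

lemma pv_key_other (md d : String) (h1 : d ≠ md) (h2 : d ≠ "www." ++ md) :
    pdPriority md d = if pvIsImportant d then toLex (2, d) else toLex (3, d) := by
  simp [pdPriority, h1, h2]

lemma pv_L1_nodup (domains : List String) (md : String) (h : domains.Nodup) :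
    (pvL1 domains md).Nodup := by
  unfold pvL1; split_ifs; exacts [h.erase _, h]

lemma pv_L2_nodup (domains : List String) (md : String) (h : domains.Nodup) :
    (pvL2 domains md).Nodup := by
  unfold pvL2; split_ifs
  exacts [(pv_L1_nodup domains md h).erase _, pv_L1_nodup domains md h]

lemma pv_md_not_mem_L2 (domains : List String) (md : String) (h : domains.Nodup) :
    md ∉ pvL2 domains md := by
  have h1 : md ∉ pvL1 domains md := by
    unfold pvL1; split_ifs with hm
    · intro hc; exact ((h.mem_erase_iff).mp hc).1 rfl
    · exact hm
  unfold pvL2; split_ifs with hw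
  · intro hc; exact h1 (List.erase_subset hc)
  · exact h1

lemma pv_www_not_mem_L2 (domains : List String) (md : String) (h : domains.Nodup) :
    ("www." ++ md) ∉ pvL2 domains md := by
  unfold pvL2; split_ifs with hw
  · intro hc; exact (((pv_L1_nodup domains md h).mem_erase_iff).mp hc).1 rfl
  · exact hw

lemma pv_sorted_strict (l : List String) (hl : l.Nodup) :
    (PySem.List.sorted l (fun x => x) false).Pairwise (· < ·) := by
  have hper := PySem.List.sorted_perm l (fun x => x) false
  have hnd : (PySem.List.sorted l (fun x => x) false).Nodup := hper.nodup_iff.mpr hl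
  have hle : (PySem.List.sorted l (fun x => x) false).Pairwise (fun a b => a ≤ b) :=
    PySem.List.sorted_pairwise l (fun x => x)
  exact (hle.and hnd).imp (fun hab => lt_of_le_of_ne hab.1 hab.2)

lemma pv_pairwise (domains : List String) (md : String) (h : domains.Nodup) :
    List.Pairwise (fun a b => pdPriority md a < pdPriority md b)
      (pvPrio domains md
        ++ PySem.List.sorted ((pvL2 domains md).filter pvIsImportant) (fun x => x) false
        ++ PySem.List.sorted ((pvL2 domains md).filter (fun d => !pvIsImportant d)) (fun x => x) false) := by
  have hL2 := pv_L2_nodup domains md h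
  -- key values on the two sorted groups
  have hk1 : ∀ d ∈ PySem.List.sorted ((pvL2 domains md).filter pvIsImportant) (fun x => x) false,
      pdPriority md d = toLex (2, d) := by
    intro d hd
    rw [PySem.List.mem_sorted] at hd
    have hdm := List.mem_of_mem_filter hd
    have hp := List.of_mem_filter hd
    rw [pv_key_other md d (fun e => pv_md_not_mem_L2 domains md h (e ▸ hdm))
        (fun e => pv_www_not_mem_L2 domains md h (e ▸ hdm)), if_pos hp]
  have hk2 : ∀ d ∈ PySem.List.sorted ((pvL2 domains md).filter (fun d => !pvIsImportant d)) (fun x => x) false,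
      pdPriority md d = toLex (3, d) := by
    intro d hd
    rw [PySem.List.mem_sorted] at hd
    have hdm := List.mem_of_mem_filter hd
    have hp := List.of_mem_filter hd
    simp only [Bool.not_eq_eq_eq_not, Bool.not_true] at hp
    rw [pv_key_other md d (fun e => pv_md_not_mem_L2 domains md h (e ▸ hdm))
        (fun e => pv_www_not_mem_L2 domains md h (e ▸ hdm)), if_neg (by simp [hp])]
  -- keys on pvPrio: class 0 or 1
  have hk0 : ∀ x ∈ pvPrio domains md, (ofLex (pdPriority md x)).1 < 2 := by
    intro x hx
    unfold pvPrio at hx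
    rw [List.mem_append] at hx
    have hx' : x = md ∨ x = "www." ++ md := by
      rcases hx with h1 | h1 <;> split_ifs at h1 <;> simp_all
    rcases hx' with rfl | rfl
    · rw [pv_key_md]; decide
    · rw [pv_key_www]; decide
  -- pairwise inside each sorted group
  have hs1 : List.Pairwise (fun a b => pdPriority md a < pdPriority md b)
      (PySem.List.sorted ((pvL2 domains md).filter pvIsImportant) (fun x => x) false) := by
    refine List.Pairwise.imp_of_mem ?_ (pv_sorted_strict _ (hL2.filter _))
    intro a b ha hb hab
    rw [hk1 a ha, hk1 b hb]
    exact pv_lex_snd rfl hab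
  have hs2 : List.Pairwise (fun a b => pdPriority md a < pdPriority md b)
      (PySem.List.sorted ((pvL2 domains md).filter (fun d => !pvIsImportant d)) (fun x => x) false) := by
    refine List.Pairwise.imp_of_mem ?_ (pv_sorted_strict _ (hL2.filter _))
    intro a b ha hb hab
    rw [hk2 a ha, hk2 b hb]
    exact pv_lex_snd rfl hab
  -- pairwise on pvPrio
  have hp0 : List.Pairwise (fun a b => pdPriority md a < pdPriority md b) (pvPrio domains md) := by
    unfold pvPrio
    split_ifs <;> simp_all [pv_key_md, pv_key_www]
    exact pv_lex_fst (by decide)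
  rw [List.append_assoc, List.pairwise_append]
  refine ⟨hp0, ?_, ?_⟩
  · rw [List.pairwise_append]
    refine ⟨hs1, hs2, ?_⟩
    intro a ha b hb
    rw [hk1 a ha, hk2 b hb]
    exact pv_lex_fst (by simp)
  · intro a ha b hb
    have h0 := hk0 a ha
    have h2 : 2 ≤ (ofLex (pdPriority md b)).1 := by
      rcases List.mem_append.mp hb with h1 | h1
      · rw [hk1 b h1]; simp
      · rw [hk2 b h1]; simp
    exact pv_lex_fst' (by omega)

-- ===== VERDICT (by name: the statement is the Claim_ definition above) =====
theorem prioritize_domains_spec : Claim_equal_prioritize_domains := by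
  intro domains md _ hpre
  unfold Spec_prioritize_domains prioritize_domains_alt
  rw [pv_A_char]
  exact (PySem.List.sorted_eq_of_perm_of_pairwise_lt domains _ (fun d => pdPriority md d)
    (pv_perm domains md) (pv_pairwise domains md hpre)).symm
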